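-- pv_equiv track=rewrite | github.com/SimonVoyer/advent_of_code | 2021/day3.py | split_by_bit
-- ===== SOURCE A (Python) =====
-- ZERO = '0'
--
-- def split_by_bit(initial_bits:list, bit_position:int, is_oxygen:bool) -> list :
--     bit_split = [[],[]]
--     for bits in initial_bits:
--         if bits[bit_position] == ZERO:
--             bit_split[0].append(bits)
--         else:
--             bit_split[1].append(bits)
--
--     nb_0s = len(bit_split[0])
--     nb_1s = len(bit_split[1])
--
--     if is_oxygen :
--         remainder = bit_split[1] if nb_1s >= nb_0s else bit_split[0]
--     else:
--         remainder = bit_split[0] if nb_0s <= nb_1s else bit_split[1]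
--     return remainder
-- ===== SOURCE B (Python) =====
-- ZERO = '0'
--
-- def split_by_bit(initial_bits: list, bit_position: int, is_oxygen: bool) -> list:
--     ones = sum(1 for b in initial_bits if b[bit_position] != ZERO)
--     zeros = len(initial_bits) - ones
--     keep_ones = ones >= zeros if is_oxygen else ones < zeros
--     return [b for b in initial_bits if (b[bit_position] != ZERO) == keep_ones]
-- ===== Notes on version B (the rewrite author's own statement) =====
-- stated objective: simpler
-- what changed: Replaces the two accumulated partition lists with a single integer count of '1'-bits, then selects the kept bit once and produces the result with one filter pass.
import Mathlib
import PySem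

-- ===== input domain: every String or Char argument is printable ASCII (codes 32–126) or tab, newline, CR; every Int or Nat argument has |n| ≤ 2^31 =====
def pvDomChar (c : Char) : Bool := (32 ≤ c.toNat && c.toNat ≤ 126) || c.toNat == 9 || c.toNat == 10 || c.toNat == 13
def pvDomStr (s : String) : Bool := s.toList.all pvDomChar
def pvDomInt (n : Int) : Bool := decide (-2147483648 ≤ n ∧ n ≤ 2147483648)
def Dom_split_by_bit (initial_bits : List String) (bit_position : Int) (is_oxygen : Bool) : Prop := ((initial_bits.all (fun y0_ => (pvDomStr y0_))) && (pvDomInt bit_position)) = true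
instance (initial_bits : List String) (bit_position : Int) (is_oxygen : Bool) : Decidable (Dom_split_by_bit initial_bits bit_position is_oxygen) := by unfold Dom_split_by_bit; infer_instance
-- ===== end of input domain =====

-- B replaces A's two accumulated partition lists by a single count of '1'-bits plus one filter pass (objective: simpler).

-- ===== PORT A =====
def split_by_bit (initial_bits : List String) (bit_position : Int) (is_oxygen : Bool) : List String :=
  let bit_split := initial_bits.foldl (fun acc bits =>
      if PySem.Str.pyGet? bits bit_position = some '0' then (acc.1 ++ [bits], acc.2)
      else (acc.1, acc.2 ++ [bits])) (([] : List String), ([] : List String))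
  let nb_0s := bit_split.1.length
  let nb_1s := bit_split.2.length
  if is_oxygen then (if nb_1s ≥ nb_0s then bit_split.2 else bit_split.1)
  else (if nb_0s ≤ nb_1s then bit_split.1 else bit_split.2)

-- ===== PORT B =====
def split_by_bit_alt (initial_bits : List String) (bit_position : Int) (is_oxygen : Bool) : List String :=
  let ones := initial_bits.countP (fun b => PySem.Str.pyGet? b bit_position ≠ some '0')
  let zeros := initial_bits.length - ones
  let keep_ones := if is_oxygen then ones ≥ zeros else ones < zeros
  initial_bits.filter (fun b => (decide (PySem.Str.pyGet? b bit_position ≠ some '0')) == keep_ones)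

-- ===== PRECONDITION & SPEC =====
-- A indexes bits[bit_position] on every element; Pre_ excludes exactly the inputs where that raises IndexError.
def Pre_split_by_bit (initial_bits : List String) (bit_position : Int) (is_oxygen : Bool) : Prop :=
  ∀ s ∈ initial_bits, PySem.Raise.InRange s.toList.length bit_position
instance (initial_bits : List String) (bit_position : Int) (is_oxygen : Bool) : Decidable (Pre_split_by_bit initial_bits bit_position is_oxygen) := by unfold Pre_split_by_bit; infer_instance

def pvWitness_split_by_bit : List String × Int × Bool := (["01", "10", "11"], 0, true)

def Spec_split_by_bit (initial_bits : List String) (bit_position : Int) (is_oxygen : Bool) (out : List String) : Prop := out = split_by_bit_alt initial_bits bit_position is_oxygen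
instance (initial_bits : List String) (bit_position : Int) (is_oxygen : Bool) (out : List String) : Decidable (Spec_split_by_bit initial_bits bit_position is_oxygen out) := by unfold Spec_split_by_bit; infer_instance

-- ===== CLAIM (what is proved, stated in full; the proofs are below) =====
def Claim_equal_split_by_bit : Prop := ∀ (initial_bits : List String) (bit_position : Int) (is_oxygen : Bool), Dom_split_by_bit initial_bits bit_position is_oxygen → Pre_split_by_bit initial_bits bit_position is_oxygen → Spec_split_by_bit initial_bits bit_position is_oxygen (split_by_bit initial_bits bit_position is_oxygen)

-- ===== LEMMAS AND PROOFS =====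

-- A's partition loop yields the two filters of the input.
theorem part_eq (bp : Int) (l : List String) (zs os : List String) :
    l.foldl (fun acc bits =>
      if PySem.Str.pyGet? bits bp = some '0' then (acc.1 ++ [bits], acc.2)
      else (acc.1, acc.2 ++ [bits])) (zs, os)
    = (zs ++ l.filter (fun b => PySem.Str.pyGet? b bp = some '0'),
       os ++ l.filter (fun b => ¬ (PySem.Str.pyGet? b bp = some '0'))) := by
  induction l generalizing zs os with
  | nil => simp
  | cons x xs ih =>
    by_cases h : PySem.Str.pyGet? x bp = some '0' <;>
      simp only [List.foldl_cons, List.filter_cons, h, decide_true, decide_false,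
        decide_not, ih, not_false_eq_true, Bool.not_true, Bool.not_false] <;>
      simp

theorem split_by_bit_spec : Claim_equal_split_by_bit := by
  intro l bp ox _ _
  unfold Spec_split_by_bit split_by_bit split_by_bit_alt
  simp only [part_eq, List.nil_append]
  have hcount : (l.filter (fun b => ¬ (PySem.Str.pyGet? b bp = some '0'))).length
      = l.countP (fun b => PySem.Str.pyGet? b bp ≠ some '0') := by
    simp [List.countP_eq_length_filter]
  have hlen : l.length
      = (l.filter (fun b => PySem.Str.pyGet? b bp = some '0')).length
        + (l.filter (fun b => ¬ (PySem.Str.pyGet? b bp = some '0'))).length := by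
    rw [List.length_eq_countP_add_countP (p := fun b => decide (PySem.Str.pyGet? b bp = some '0'))]
    simp [List.countP_eq_length_filter]
  have hzero : l.length - l.countP (fun b => PySem.Str.pyGet? b bp ≠ some '0')
      = (l.filter (fun b => PySem.Str.pyGet? b bp = some '0')).length := by omega
  have hfT : l.filter (fun b => (decide (PySem.Str.pyGet? b bp ≠ some '0')) == true)
      = l.filter (fun b => ¬ (PySem.Str.pyGet? b bp = some '0')) := by
    apply List.filter_congr; intro b _; simp
  have hfF : l.filter (fun b => (decide (PySem.Str.pyGet? b bp ≠ some '0')) == false)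
      = l.filter (fun b => PySem.Str.pyGet? b bp = some '0') := by
    apply List.filter_congr; intro b _; simp
  simp only [hzero]
  by_cases hge : l.countP (fun b => PySem.Str.pyGet? b bp ≠ some '0')
      ≥ (l.filter (fun b => PySem.Str.pyGet? b bp = some '0')).length
  · have hdT : decide (l.countP (fun b => PySem.Str.pyGet? b bp ≠ some '0')
        ≥ (l.filter (fun b => PySem.Str.pyGet? b bp = some '0')).length) = true :=
      decide_eq_true hge
    have hdF : decide (l.countP (fun b => PySem.Str.pyGet? b bp ≠ some '0')
        < (l.filter (fun b => PySem.Str.pyGet? b bp = some '0')).length) = false :=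
      decide_eq_false (by omega)
    cases ox with
    | true =>
      simp only [if_true, hdT]
      rw [if_pos (by omega), hfT]
    | false =>
      simp only [Bool.false_eq_true, if_false, hdF]
      rw [if_pos (by omega), hfF]
  · have hdT : decide (l.countP (fun b => PySem.Str.pyGet? b bp ≠ some '0')
        ≥ (l.filter (fun b => PySem.Str.pyGet? b bp = some '0')).length) = false :=
      decide_eq_false hge
    have hdF : decide (l.countP (fun b => PySem.Str.pyGet? b bp ≠ some '0')
        < (l.filter (fun b => PySem.Str.pyGet? b bp = some '0')).length) = true :=
      decide_eq_true (by omega)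
    cases ox with
    | true =>
      simp only [if_true, hdT]
      rw [if_neg (by omega), hfF]
    | false =>
      simp only [Bool.false_eq_true, if_false, hdF]
      rw [if_neg (by omega), hfT]
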